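-- pv_equiv track=rewrite | github.com/Son94JB/My_Git | 백준/Gold V/2138. 전구와 스위치/전구와 스위치.py | solve
-- ===== SOURCE A (Python) =====
-- def toggle(a):
--     if a == 0:
--         return 1
--     else:
--         return 0
--
-- def change(idx, switches):
--     switches[idx] = toggle(switches[idx])
--     if idx > 0:
--         switches[idx - 1] = toggle(switches[idx - 1])
--     if idx < len(switches) - 1:
--         switches[idx + 1] = toggle(switches[idx + 1])
--
--     return switches
--
-- def solve(N, switch, goal):
--     count1 = 0
--     count2 = 1
--     switch1 = switch[:]
--     switch2 = switch[:]
--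
--     # 첫 번째 스위치를 누르지 않는 경우
--     for i in range(1, N):
--         if switch1[i - 1] != goal[i - 1]:
--             switch1 = change(i, switch1)
--             count1 += 1
--
--     # 첫 번째 스위치를 누르는 경우
--     switch2 = change(0, switch2)
--     for i in range(1, N):
--         if switch2[i - 1] != goal[i - 1]:
--             switch2 = change(i, switch2)
--             count2 += 1
--
--     if switch1 == goal and switch2 != goal:
--         return count1
--     elif switch1 != goal and switch2 == goal:
--         return count2
--     elif switch1 == goal and switch2 == goal:
--         return min(count1, count2)
--     else:
--         return -1
-- ===== SOURCE B (Python) =====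
-- def solve(N, switch, goal):
--     # Simulation without mutation: record the greedy press decisions in a list,
--     # then build the final configuration in one comprehension (bulb(x, k) is a
--     # bulb that started as x after k toggles) and compare it to the goal.
--     def bulb(x, k):
--         if k == 0:
--             return x
--         return ((0 if x == 0 else 1) + k) % 2
--
--     def attempt(first):
--         press = [first]
--         for i in range(1, N):
--             k = press[i - 1] + (press[i - 2] if i >= 2 else 0)
--             press.append(0 if bulb(switch[i - 1], k) == goal[i - 1] else 1)
--         final = [bulb(x, sum(press[max(0, j - 1):j + 2])) for j, x in enumerate(switch)]
--         return sum(press), final == goal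
--
--     c1, ok1 = attempt(0)
--     c2, ok2 = attempt(1)
--     if ok1 and ok2:
--         return min(c1, c2)
--     if ok1:
--         return c1
--     if ok2:
--         return c2
--     return -1
-- ===== Notes on version B (the rewrite author's own statement) =====
-- stated objective: alternative
-- what changed: Replaces A's two mutated list copies and toggle/change helpers by a press-decision list built greedily with the recurrence bulb(x,k) = bulb x after k toggles, from which the final configuration is constructed once and compared to the goal; Pre_ excludes only inputs on which A raises IndexError (empty switch, N > len(switch), or N-1 > len(goal)), except a few such inputs where a luckily matching prefix lets A return anyway, and there B returns the same value.
-- outside the precondition, e.g. on solve(3, [0, 1], [0, 1]): A returns 0, B returns 0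
import Mathlib
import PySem

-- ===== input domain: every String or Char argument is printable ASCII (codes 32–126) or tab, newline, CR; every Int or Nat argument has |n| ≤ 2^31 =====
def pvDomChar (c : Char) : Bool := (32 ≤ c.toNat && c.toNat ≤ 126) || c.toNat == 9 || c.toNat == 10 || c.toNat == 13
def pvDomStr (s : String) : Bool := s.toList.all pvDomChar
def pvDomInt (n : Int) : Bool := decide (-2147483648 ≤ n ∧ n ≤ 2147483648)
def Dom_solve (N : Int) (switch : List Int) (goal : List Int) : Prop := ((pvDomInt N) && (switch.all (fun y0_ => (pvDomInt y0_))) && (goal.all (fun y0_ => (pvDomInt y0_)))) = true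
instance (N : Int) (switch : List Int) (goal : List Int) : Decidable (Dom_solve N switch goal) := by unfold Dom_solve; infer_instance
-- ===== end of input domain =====

-- B records the greedy press decisions in a list instead of mutating two copies of the
-- switch list, builds the final configuration once from the recurrence
-- bulb x k = a bulb x after k toggles, and compares it to the goal
-- (objective: alternative; same O(N) cost).

-- ===== PORT A =====
def pvToggle (a : Int) : Int := if a = 0 then 1 else 0

def pvChange (idx : Int) (switches : List Int) : List Int :=
  let s1 := PySem.List.pySetD switches idx (pvToggle (PySem.List.pyGetD switches idx 0))
  let s2 := if 0 < idx then PySem.List.pySetD s1 (idx - 1) (pvToggle (PySem.List.pyGetD s1 (idx - 1) 0)) else s1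
  if idx < (s2.length : Int) - 1 then PySem.List.pySetD s2 (idx + 1) (pvToggle (PySem.List.pyGetD s2 (idx + 1) 0)) else s2

def pvStepA (goal : List Int) (st : List Int × Int) (i : Int) : List Int × Int :=
  if PySem.List.pyGetD st.1 (i - 1) 0 ≠ PySem.List.pyGetD goal (i - 1) 0 then
    (pvChange i st.1, st.2 + 1)
  else st

def solve (N : Int) (switch : List Int) (goal : List Int) : Int :=
  let r1 := (PySem.List.pyRange 1 N 1).foldl (pvStepA goal) (switch, 0)
  let r2 := (PySem.List.pyRange 1 N 1).foldl (pvStepA goal) (pvChange 0 switch, 1)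
  if r1.1 = goal ∧ r2.1 ≠ goal then r1.2
  else if r1.1 ≠ goal ∧ r2.1 = goal then r2.2
  else if r1.1 = goal ∧ r2.1 = goal then min r1.2 r2.2
  else -1

-- ===== PORT B =====
def pvBulb (x k : Int) : Int :=
  if k = 0 then x else PySem.Int.mod ((if x = 0 then 0 else 1) + k) 2

def pvStepB (switch goal : List Int) (press : List Int) (i : Int) : List Int :=
  press ++ [if pvBulb (PySem.List.pyGetD switch (i - 1) 0)
      (PySem.List.pyGetD press (i - 1) 0 +
        (if 2 ≤ i then PySem.List.pyGetD press (i - 2) 0 else 0)) =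
      PySem.List.pyGetD goal (i - 1) 0 then 0 else 1]

def pvAttempt (N : Int) (switch goal : List Int) (first : Int) : Int × Bool :=
  let press := (PySem.List.pyRange 1 N 1).foldl (pvStepB switch goal) [first]
  let final := (PySem.List.enumerate switch 0).map (fun jx =>
    pvBulb jx.2 ((PySem.List.slice press (some (max 0 (jx.1 - 1))) (some (jx.1 + 2))).sum))
  (press.sum, decide (final = goal))

def solve_alt (N : Int) (switch : List Int) (goal : List Int) : Int :=
  let r1 := pvAttempt N switch goal 0
  let r2 := pvAttempt N switch goal 1
  if r1.2 && r2.2 then min r1.1 r2.1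
  else if r1.2 then r1.1
  else if r2.2 then r2.1
  else -1

-- ===== PRECONDITION & SPEC =====
-- Pre_ is exactly the closed-form region where A cannot raise: a nonempty switch list,
-- N ≤ len(switch) and N - 1 ≤ len(goal); outside it A raises IndexError on every input
-- except a few where a luckily matching prefix stops the greedy from pressing an
-- out-of-range switch (B returns the same value on those as well).
def Pre_solve (N : Int) (switch : List Int) (goal : List Int) : Prop :=
  switch ≠ [] ∧ N ≤ (switch.length : Int) ∧ N - 1 ≤ (goal.length : Int)
instance (N : Int) (switch : List Int) (goal : List Int) : Decidable (Pre_solve N switch goal) := by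
  unfold Pre_solve; infer_instance

def pvWitness_solve : Int × List Int × List Int := (3, [0, 1, 0], [1, 0, 1])

def Spec_solve (N : Int) (switch : List Int) (goal : List Int) (out : Int) : Prop := out = solve_alt N switch goal
instance (N : Int) (switch : List Int) (goal : List Int) (out : Int) : Decidable (Spec_solve N switch goal out) := by
  unfold Spec_solve; infer_instance

-- ===== CLAIM (what is proved, stated in full; the proofs are below) =====
def Claim_equal_solve : Prop := ∀ (N : Int) (switch : List Int) (goal : List Int), Dom_solve N switch goal → Pre_solve N switch goal → Spec_solve N switch goal (solve N switch goal)

-- ===== LEMMAS AND PROOFS =====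
-- pvW P j = total number of presses affecting bulb j (neighbouring entries of the press list)
def pvW (P : List Int) (j : Nat) : Int :=
  (if j = 0 then 0 else P.getD (j - 1) 0) + P.getD j 0 + P.getD (j + 1) 0

def pvInv (sw gl : List Int) (i : Nat) (s : List Int) (cnt : Int) (P : List Int) : Prop :=
  P.length = i ∧ (∀ t : Nat, P.getD t 0 = 0 ∨ P.getD t 0 = 1) ∧ cnt = P.sum ∧
  s.length = sw.length ∧
  (∀ j : Nat, j < sw.length → s.getD j 0 = pvBulb (sw.getD j 0) (pvW P j))

lemma pvBulb_zero (x : Int) : pvBulb x 0 = x := by simp [pvBulb]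

lemma pvToggle_bulb (x k : Int) (hk : 0 ≤ k) : pvToggle (pvBulb x k) = pvBulb x (k + 1) := by
  have h2 : (0:Int) < 2 := by omega
  simp only [pvBulb, pvToggle, PySem.Int.mod_eq_emod_of_pos h2]
  rcases eq_or_ne k 0 with hk0 | hk0
  · subst hk0
    by_cases hx : x = 0 <;> simp [hx]
  · have hk1 : ¬ (k + 1 = 0) := by omega
    rw [if_neg hk0, if_neg hk1]
    by_cases hx : x = 0 <;> simp only [hx, if_true, if_false] <;> split_ifs <;> omega

lemma pvToggle_bulb_one (x : Int) : pvToggle x = pvBulb x 1 := by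
  have h := pvToggle_bulb x 0 le_rfl
  rwa [pvBulb_zero, zero_add] at h

lemma pvChange_length (i : Int) (s : List Int) : (pvChange i s).length = s.length := by
  simp only [pvChange]
  split_ifs <;> simp [PySem.List.length_pySetD]

lemma pvGetD_set (s : List Int) (a j : Nat) (v : Int) :
    (s.set a v).getD j 0 = if a = j ∧ a < s.length then v else s.getD j 0 := by
  simp only [List.getD_eq_getElem?_getD, List.getElem?_set]
  split_ifs with h1 h2 h3 <;> simp_all
  omega

lemma pvGetD_oob (s : List Int) (t : Nat) (h : s.length ≤ t) : s.getD t 0 = 0 := by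
  simp [List.getD_eq_getElem?_getD, List.getElem?_eq_none h]

lemma pvGetD_append (P : List Int) (v : Int) (t : Nat) :
    (P ++ [v]).getD t 0 = if t = P.length then v else P.getD t 0 := by
  rcases lt_trichotomy t P.length with h | h | h
  · rw [if_neg (by omega)]
    rw [List.getD_eq_getElem _ _ (by simp; omega), List.getD_eq_getElem _ _ h,
        List.getElem_append_left h]
  · subst h
    rw [if_pos rfl, List.getD_eq_getElem _ _ (by simp)]
    simp
  · rw [if_neg (by omega), pvGetD_oob _ _ (by simp; omega), pvGetD_oob _ _ (by omega)]

lemma pvChange_getD (i : Nat) (s : List Int) (hi : i < s.length) (j : Nat) :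
    (pvChange (i : Int) s).getD j 0 =
      if (j = i ∨ j + 1 = i ∨ j = i + 1) ∧ j < s.length then pvToggle (s.getD j 0) else s.getD j 0 := by
  simp only [pvChange]
  rcases Nat.eq_zero_or_pos i with h0 | h0
  · subst h0
    rw [if_neg (show ¬ ((0:Int) < ((0:Nat):Int)) by omega)]
    rw [show ((0:Nat):Int) + 1 = ((1:Nat):Int) by omega]
    simp only [PySem.List.pySetD_natCast, PySem.List.pyGetD_natCast, List.length_set]
    by_cases h1 : ((0:Nat):Int) < (s.length:Int) - 1
    · rw [if_pos h1]
      have hlen2 : 1 < s.length := by omega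
      have r1 : (s.set 0 (pvToggle (s.getD 0 0))).getD 1 0 = s.getD 1 0 := by
        rw [pvGetD_set, if_neg (by omega)]
      rw [r1, pvGetD_set, List.length_set, pvGetD_set]
      rcases eq_or_ne j 0 with hj0 | hj0
      · subst hj0
        rw [if_neg (by omega), if_pos (by omega), if_pos (by omega)]
      · rcases eq_or_ne j 1 with hj1 | hj1
        · subst hj1
          rw [if_pos (by omega), if_pos (by omega)]
        · rw [if_neg (by omega), if_neg (by omega), if_neg (by omega)]
    · rw [if_neg h1]
      rw [pvGetD_set]
      rcases eq_or_ne j 0 with hj0 | hj0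
      · subst hj0
        rw [if_pos (by omega), if_pos (by omega)]
      · rw [if_neg (by omega), if_neg (by omega)]
  · rw [if_pos (show (0:Int) < ((i:Nat):Int) by omega)]
    rw [show ((i:Nat):Int) - 1 = ((i-1 : Nat) : Int) by omega,
        show ((i:Nat):Int) + 1 = ((i+1 : Nat) : Int) by omega]
    simp only [PySem.List.pySetD_natCast, PySem.List.pyGetD_natCast, List.length_set]
    have r1 : (s.set i (pvToggle (s.getD i 0))).getD (i-1) 0 = s.getD (i-1) 0 := by
      rw [pvGetD_set, if_neg (by omega)]
    rw [r1]
    by_cases h1 : ((i:Nat):Int) < (s.length:Int) - 1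
    · rw [if_pos h1]
      have hlen : i + 1 < s.length := by omega
      have r2 : ((s.set i (pvToggle (s.getD i 0))).set (i-1) (pvToggle (s.getD (i-1) 0))).getD (i+1) 0
          = s.getD (i+1) 0 := by
        rw [pvGetD_set, List.length_set, if_neg (by omega), pvGetD_set, if_neg (by omega)]
      rw [r2, pvGetD_set]
      simp only [List.length_set]
      rcases eq_or_ne j (i+1) with hj2 | hj2
      · subst hj2
        rw [if_pos (by omega), if_pos (by omega)]
      · rw [if_neg (by omega), pvGetD_set, List.length_set]
        rcases eq_or_ne j (i-1) with hj3 | hj3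
        · subst hj3
          rw [if_pos (by omega), if_pos (by omega)]
        · rw [if_neg (by omega), pvGetD_set]
          rcases eq_or_ne j i with hj4 | hj4
          · subst hj4
            rw [if_pos (by omega), if_pos (by omega)]
          · rw [if_neg (by omega), if_neg (by omega)]
    · rw [if_neg h1]
      rw [pvGetD_set, List.length_set]
      rcases eq_or_ne j (i-1) with hj3 | hj3
      · subst hj3
        rw [if_pos (by omega), if_pos (by omega)]
      · rw [if_neg (by omega), pvGetD_set]
        rcases eq_or_ne j i with hj4 | hj4
        · subst hj4
          rw [if_pos (by omega), if_pos (by omega)]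
        · rw [if_neg (by omega), if_neg (by omega)]

lemma pvW_nonneg (P : List Int) (hP : ∀ t : Nat, P.getD t 0 = 0 ∨ P.getD t 0 = 1) (j : Nat) :
    0 ≤ pvW P j := by
  unfold pvW
  have h1 := hP j
  have h2 := hP (j + 1)
  have h3 := hP (j - 1)
  split_ifs <;> omega

lemma pvW_append (P : List Int) (v : Int) (j : Nat) :
    pvW (P ++ [v]) j =
      pvW P j + (if j = P.length ∨ j + 1 = P.length ∨ j = P.length + 1 then v else 0) := by
  unfold pvW
  rcases lt_trichotomy (j + 1) P.length with hcase | hcase | hcase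
  · rw [pvGetD_append, pvGetD_append, pvGetD_append]
    split_ifs <;> omega
  · have z2 := pvGetD_oob P (j + 1) (by omega)
    rw [pvGetD_append, pvGetD_append, pvGetD_append]
    split_ifs <;> omega
  · have z2 := pvGetD_oob P (j + 1) (by omega)
    have z3 := pvGetD_oob P j (by omega)
    rcases eq_or_ne j P.length with h | h
    · rw [pvGetD_append, pvGetD_append, pvGetD_append]
      split_ifs <;> omega
    · have z4 := pvGetD_oob P (j - 1) (by omega)
      rw [pvGetD_append, pvGetD_append, pvGetD_append]
      split_ifs <;> omega

lemma pvLoop (sw gl : List Int) (n : Nat) (hnL : n ≤ sw.length) :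
    ∀ (k i : Nat) (s : List Int) (cnt : Int) (P : List Int), 1 ≤ i → i + k = n →
      pvInv sw gl i s cnt P →
      pvInv sw gl n
        (((PySem.List.pyRange (i : Int) (n : Int) 1).foldl (pvStepA gl) (s, cnt)).1)
        (((PySem.List.pyRange (i : Int) (n : Int) 1).foldl (pvStepA gl) (s, cnt)).2)
        ((PySem.List.pyRange (i : Int) (n : Int) 1).foldl (pvStepB sw gl) P) := by
  intro k
  induction k with
  | zero =>
    intro i s cnt P h1 hik hinv
    have hi : i = n := by omega
    subst hi
    rw [PySem.List.pyRange_one_eq_nil (le_refl _)]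
    simpa using hinv
  | succ k ih =>
    intro i s cnt P h1 hik hinv
    have hlt : (i : Int) < (n : Int) := by exact_mod_cast (by omega : i < n)
    have hiL : i < sw.length := by omega
    have hi1L : i - 1 < sw.length := by omega
    rw [PySem.List.pyRange_one_cons hlt]
    simp only [List.foldl_cons]
    rw [show (i : Int) + 1 = ((i + 1 : Nat) : Int) by omega]
    obtain ⟨hlen, hent, hcnt, hslen, hs⟩ := hinv
    have hei : (i : Int) - 1 = ((i - 1 : Nat) : Int) := by omega
    have hei2 : (i : Int) - 2 = ((i - 2 : Nat) : Int) ∨ i = 1 := by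
      rcases eq_or_ne i 1 with h | h
      · exact Or.inr h
      · exact Or.inl (by omega)
    -- B's k equals pvW P (i-1)
    have hk : PySem.List.pyGetD P ((i:Int) - 1) 0 +
        (if 2 ≤ (i:Int) then PySem.List.pyGetD P ((i:Int) - 2) 0 else 0) = pvW P (i - 1) := by
      unfold pvW
      have htop : P.getD i 0 = 0 := pvGetD_oob _ _ (by omega)
      rcases hei2 with h | h
      · rw [hei, h, PySem.List.pyGetD_natCast, PySem.List.pyGetD_natCast,
            if_pos (show (2:Int) ≤ (i:Int) by
              rcases eq_or_ne i 1 with h1 | h1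
              · exfalso; subst h1; omega
              · omega),
            if_neg (show ¬ (i - 1 = 0) by omega),
            show i - 1 - 1 = i - 2 by omega, show i - 1 + 1 = i by omega, htop]
        ring
      · subst h
        rw [hei, PySem.List.pyGetD_natCast,
            if_neg (show ¬ ((2:Int) ≤ ((1:Nat):Int)) by norm_num)]
        rw [show (1:Nat) - 1 = 0 from rfl, if_pos rfl, show (0:Nat) + 1 = 1 from rfl, htop]
        ring
    have hsv : s.getD (i-1) 0 = pvBulb (sw.getD (i-1) 0) (pvW P (i-1)) := hs (i-1) hi1L
    by_cases hc : pvBulb (sw.getD (i-1) 0) (pvW P (i-1)) = gl.getD (i-1) 0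
    · -- no press: A keeps its state, B appends 0
      have hstepA : pvStepA gl (s, cnt) (i : Int) = (s, cnt) := by
        simp only [pvStepA, hei, PySem.List.pyGetD_natCast]
        rw [if_neg (not_ne_iff.mpr (by rw [hsv, hc]))]
      have hstepB : pvStepB sw gl P (i : Int) = P ++ [0] := by
        simp only [pvStepB]
        rw [hk]
        simp only [hei, PySem.List.pyGetD_natCast]
        rw [if_pos hc]
      rw [hstepA, hstepB]
      refine ih (i+1) s cnt (P ++ [0]) (by omega) (by omega)
        ⟨by simp [hlen], ?_, by simp [hcnt], hslen, ?_⟩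
      · intro t
        rw [pvGetD_append]
        split_ifs with h
        · exact Or.inl rfl
        · exact hent t
      · intro j hj
        rw [hs j hj, pvW_append, hlen]
        split_ifs <;> simp
    · -- press: A changes bulb i and its neighbours, B appends 1
      have hstepA : pvStepA gl (s, cnt) (i : Int) = (pvChange i s, cnt + 1) := by
        simp only [pvStepA, hei, PySem.List.pyGetD_natCast]
        rw [if_pos (by rw [ne_eq, hsv]; exact hc)]
      have hstepB : pvStepB sw gl P (i : Int) = P ++ [1] := by
        simp only [pvStepB]
        rw [hk]
        simp only [hei, PySem.List.pyGetD_natCast]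
        rw [if_neg hc]
      rw [hstepA, hstepB]
      have hch := pvChange_getD i s (by omega)
      refine ih (i+1) (pvChange i s) (cnt + 1) (P ++ [1]) (by omega) (by omega)
        ⟨by simp [hlen], ?_, by simp [hcnt], by rw [pvChange_length]; exact hslen, ?_⟩
      · intro t
        rw [pvGetD_append]
        split_ifs with h
        · exact Or.inr rfl
        · exact hent t
      · intro j hj
        rw [hch j, hs j (by omega), pvW_append, hlen]
        by_cases hcond : j = i ∨ j + 1 = i ∨ j = i + 1
        · rw [if_pos ⟨hcond, by omega⟩, if_pos hcond, pvToggle_bulb _ _ (pvW_nonneg P hent j)]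
        · rw [if_neg (by tauto), if_neg hcond, add_zero]

lemma pvSum_take3 (Q : List Int) : (Q.take 3).sum = Q.getD 0 0 + Q.getD 1 0 + Q.getD 2 0 := by
  rcases Q with (_ | ⟨a, (_ | ⟨b, (_ | ⟨c, t⟩)⟩)⟩) <;> simp [List.getD] <;> ring

lemma pvSum_take3_drop (P : List Int) (m : Nat) :
    ((P.drop m).take 3).sum = P.getD m 0 + P.getD (m + 1) 0 + P.getD (m + 2) 0 := by
  rw [pvSum_take3]
  simp [List.getD_eq_getElem?_getD, List.getElem?_drop]

lemma pvSum_take2 (Q : List Int) : (Q.take 2).sum = Q.getD 0 0 + Q.getD 1 0 := by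
  rcases Q with (_ | ⟨a, (_ | ⟨b, t⟩)⟩) <;> simp [List.getD]

lemma pvFinal_eq (sw gl : List Int) (P : List Int) (s : List Int)
    (hslen : s.length = sw.length)
    (hs : ∀ j : Nat, j < sw.length → s.getD j 0 = pvBulb (sw.getD j 0) (pvW P j)) :
    (PySem.List.enumerate sw 0).map (fun jx =>
      pvBulb jx.2 ((PySem.List.slice P (some (max 0 (jx.1 - 1))) (some (jx.1 + 2))).sum)) = s := by
  apply List.ext_getElem (by simp [PySem.List.length_enumerate, hslen])
  intro j hj1 hj2
  have hjL : j < sw.length := by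
    simpa [PySem.List.length_enumerate] using hj1
  rw [List.getElem_map, PySem.List.getElem_enumerate]
  have hgoal : s[j] = pvBulb (sw.getD j 0) (pvW P j) := by
    rw [← List.getD_eq_getElem s 0 hj2]
    exact hs j hjL
  rw [hgoal, ← List.getD_eq_getElem sw 0 (by omega)]
  congr 1
  -- the slice sum equals pvW P j
  rcases eq_or_ne j 0 with h0 | h0
  · subst h0
    rw [show (0:Int) + (0:Nat) = ((0:Nat):Int) by norm_num]
    rw [show max 0 (((0:Nat):Int) - 1) = ((0:Nat):Int) by simp]
    rw [show ((0:Nat):Int) + 2 = ((2:Nat):Int) by norm_num]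
    rw [PySem.List.slice_natCast]
    simp only [List.drop_zero]
    rw [show (2:Nat) - 0 = 2 from rfl, pvSum_take2]
    unfold pvW
    simp
  · rw [show (0:Int) + (j:Nat) = ((j:Nat):Int) by norm_num]
    rw [show max 0 (((j:Nat):Int) - 1) = (((j-1:Nat)):Int) by omega]
    rw [show ((j:Nat):Int) + 2 = ((j+2:Nat):Int) by omega]
    rw [PySem.List.slice_natCast, show j + 2 - (j - 1) = 3 by omega, pvSum_take3_drop]
    unfold pvW
    rw [if_neg h0, show j - 1 + 1 = j by omega, show j - 1 + 2 = j + 1 by omega]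

lemma pvAttempt_spec (N : Int) (sw gl : List Int) (first cnt0 : Int) (s0 : List Int)
    (hL : 0 < sw.length) (hN : N ≤ (sw.length : Int))
    (hinv : pvInv sw gl 1 s0 cnt0 [first]) :
    (pvAttempt N sw gl first).1 = ((PySem.List.pyRange 1 N 1).foldl (pvStepA gl) (s0, cnt0)).2 ∧
    ((pvAttempt N sw gl first).2 = true ↔
      ((PySem.List.pyRange 1 N 1).foldl (pvStepA gl) (s0, cnt0)).1 = gl) := by
  by_cases hN1 : N ≤ 1
  · -- empty range: everything is decided by the initial state
    obtain ⟨_, _, hcnt, hslen, hs⟩ := hinv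
    rw [PySem.List.pyRange_one_eq_nil hN1]
    simp only [List.foldl_nil, pvAttempt, PySem.List.pyRange_one_eq_nil hN1]
    rw [pvFinal_eq sw gl [first] s0 hslen hs]
    exact ⟨by simpa using hcnt.symm, by simp⟩
  · have hn : ((N.toNat : Nat) : Int) = N := Int.toNat_of_nonneg (by omega)
    have L := pvLoop sw gl N.toNat (by omega) (N.toNat - 1) 1 s0 cnt0 [first]
      (le_refl _) (by omega) hinv
    rw [hn] at L
    simp only [Nat.cast_one] at L
    obtain ⟨_, _, hcnt, hslen, hs⟩ := L
    simp only [pvAttempt]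
    rw [pvFinal_eq sw gl _ _ hslen hs]
    exact ⟨hcnt.symm, by simp⟩

lemma pvInit1 (sw gl : List Int) : pvInv sw gl 1 sw 0 [(0:Int)] := by
  refine ⟨rfl, ?_, by simp, rfl, ?_⟩
  · intro t
    rcases t with (_ | t) <;> simp [List.getD]
  · intro j hj
    have : pvW [(0:Int)] j = 0 := by
      unfold pvW
      rcases j with (_ | (_ | j)) <;> simp [List.getD]
    rw [this, pvBulb_zero]

lemma pvInit2 (sw gl : List Int) (hL : 0 < sw.length) :
    pvInv sw gl 1 (pvChange 0 sw) 1 [(1:Int)] := by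
  have hch := pvChange_getD 0 sw hL
  simp only [Nat.cast_zero] at hch
  refine ⟨rfl, ?_, by simp, by rw [pvChange_length], ?_⟩
  · intro t
    rcases t with (_ | t) <;> simp [List.getD]
  · intro j hj
    rw [hch j]
    have hw : pvW [(1:Int)] j = if j = 0 ∨ j = 1 then 1 else 0 := by
      unfold pvW
      rcases j with (_ | (_ | j)) <;> simp [List.getD]
    rw [hw]
    by_cases hcond : j = 0 ∨ j = 1
    · rw [if_pos ⟨by omega, hj⟩, if_pos hcond, pvToggle_bulb_one]
    · rw [if_neg (by omega), if_neg hcond, pvBulb_zero]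

theorem pv_main (N : Int) (sw gl : List Int) (hne : sw ≠ [])
    (hNL : N ≤ (sw.length : Int)) (_hNG : N - 1 ≤ (gl.length : Int)) :
    solve N sw gl = solve_alt N sw gl := by
  have hL : 0 < sw.length := List.length_pos_of_ne_nil hne
  have R1 := pvAttempt_spec N sw gl 0 0 sw hL hNL (pvInit1 sw gl)
  have R2 := pvAttempt_spec N sw gl 1 1 (pvChange 0 sw) hL hNL (pvInit2 sw gl hL)
  simp only [solve, solve_alt]
  by_cases e1 : ((PySem.List.pyRange 1 N 1).foldl (pvStepA gl) (sw, 0)).1 = gl <;>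
    by_cases e2 : ((PySem.List.pyRange 1 N 1).foldl (pvStepA gl) (pvChange 0 sw, 1)).1 = gl
  · have b1 : (pvAttempt N sw gl 0).2 = true := R1.2.mpr e1
    have b2 : (pvAttempt N sw gl 1).2 = true := R2.2.mpr e2
    rw [if_neg (by simp [e1, e2]), if_neg (by simp [e1, e2]), if_pos ⟨e1, e2⟩,
        if_pos (by simp [b1, b2]), ← R1.1, ← R2.1]
  · have b1 : (pvAttempt N sw gl 0).2 = true := R1.2.mpr e1
    have b2 : (pvAttempt N sw gl 1).2 = false :=
      Bool.not_eq_true _ ▸ (fun h => e2 (R2.2.mp h))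
    rw [if_pos ⟨e1, e2⟩, if_neg (by simp [b1, b2]), if_pos (by simp [b1]), ← R1.1]
  · have b1 : (pvAttempt N sw gl 0).2 = false :=
      Bool.not_eq_true _ ▸ (fun h => e1 (R1.2.mp h))
    have b2 : (pvAttempt N sw gl 1).2 = true := R2.2.mpr e2
    rw [if_neg (by simp [e1, e2]), if_pos ⟨e1, e2⟩,
        if_neg (by simp [b1, b2]), if_neg (by simp [b1]), if_pos (by simp [b2]), ← R2.1]
  · have b1 : (pvAttempt N sw gl 0).2 = false :=
      Bool.not_eq_true _ ▸ (fun h => e1 (R1.2.mp h))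
    have b2 : (pvAttempt N sw gl 1).2 = false :=
      Bool.not_eq_true _ ▸ (fun h => e2 (R2.2.mp h))
    rw [if_neg (by simp [e1, e2]), if_neg (by simp [e1, e2]), if_neg (by simp [e1, e2]),
        if_neg (by simp [b1, b2]), if_neg (by simp [b1]), if_neg (by simp [b2])]

-- ===== VERDICT (by name: the statement is the Claim_ definition above) =====
theorem solve_spec : Claim_equal_solve := by
  intro N switch goal _ hpre
  obtain ⟨hne, hNL, hNG⟩ := hpre
  unfold Spec_solve
  exact pv_main N switch goal hne hNL hNG
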